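-- pv_equiv track=rewrite | github.com/AksanaCherkalina/-Performance-Lab | task1/task1.py | circular_array_path
-- ===== SOURCE A (Python) =====
-- def circular_array_path(n, m):
--     path = []
--     current_position = 0
--     while True:
--         current_position = (current_position + m) % n
--         path.append(current_position + 1)
--         if current_position == 0:
--             break
--     return path
-- ===== SOURCE B (Python) =====
-- def circular_array_path(n, m):
--     # closed form: cycle length L = |n| / gcd(|n|, |m|); position after step i is (i*m) % n
--     a, b = abs(n), abs(m)
--     while b:
--         a, b = b, a % b
--     L = abs(n) // a
--     return [(i * m) % n + 1 for i in range(1, L + 1)]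
-- ===== Notes on version B (the rewrite author's own statement) =====
-- stated objective: simpler
-- what changed: Replaces the step-until-back-at-zero while loop with a closed form: cycle length L = |n|/gcd(|n|,|m|) computed by Euclid's algorithm, then the path built directly as [(i*m) % n + 1 for i in range(1, L+1)].
import Mathlib
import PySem

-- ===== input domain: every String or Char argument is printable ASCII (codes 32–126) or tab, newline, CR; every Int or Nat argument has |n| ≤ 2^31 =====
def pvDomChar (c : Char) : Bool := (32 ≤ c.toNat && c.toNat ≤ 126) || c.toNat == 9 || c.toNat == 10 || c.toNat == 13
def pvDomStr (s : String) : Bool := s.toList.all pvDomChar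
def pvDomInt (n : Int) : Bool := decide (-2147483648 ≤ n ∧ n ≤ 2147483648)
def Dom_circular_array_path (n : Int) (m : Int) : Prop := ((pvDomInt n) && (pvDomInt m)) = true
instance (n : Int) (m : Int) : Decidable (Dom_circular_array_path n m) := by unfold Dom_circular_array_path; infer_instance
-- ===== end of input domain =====

-- B replaces A's step-until-back-at-zero while loop by the closed form: cycle length
-- L = |n| / gcd(|n|, |m|) and path element i is (i*m) % n + 1 (objective: simpler).

-- ===== PORT A =====
-- A's `while True` loop; the fuel argument only makes the recursion total
-- (for n ≠ 0 the loop returns within |n| iterations, proved below).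
def pvALoop (n m : Int) : Nat → Int → List Int
  | 0, _ => []
  | fuel + 1, pos =>
    let pos' := PySem.Int.mod (pos + m) n
    if pos' = 0 then [pos' + 1] else (pos' + 1) :: pvALoop n m fuel pos'

def circular_array_path (n : Int) (m : Int) : List Int :=
  pvALoop n m n.natAbs 0

-- ===== PORT B =====
-- Source B's hand-written Euclid loop `while b: a, b = b, a % b`
def pvGcdLoop : Nat → Nat → Nat
  | a, 0 => a
  | a, b + 1 => pvGcdLoop (b + 1) (a % (b + 1))
decreasing_by exact Nat.mod_lt _ (Nat.succ_pos b)

def circular_array_path_alt (n : Int) (m : Int) : List Int :=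
  let g := pvGcdLoop n.natAbs m.natAbs
  let L := n.natAbs / g
  (PySem.List.pyRange 1 ((L : Int) + 1) 1).map (fun i => PySem.Int.mod (i * m) n + 1)

-- ===== PRECONDITION & SPEC =====
-- Python A raises ZeroDivisionError at the first `% n` when n == 0; those inputs are excluded.
def Pre_circular_array_path (n : Int) (m : Int) : Prop := n ≠ 0
instance (n : Int) (m : Int) : Decidable (Pre_circular_array_path n m) := by unfold Pre_circular_array_path; infer_instance
def pvWitness_circular_array_path : Int × Int := (5, 3)

def Spec_circular_array_path (n : Int) (m : Int) (out : List Int) : Prop := out = circular_array_path_alt n m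
instance (n : Int) (m : Int) (out : List Int) : Decidable (Spec_circular_array_path n m out) := by unfold Spec_circular_array_path; infer_instance

-- ===== CLAIM =====
def Claim_equal_circular_array_path : Prop := ∀ (n : Int) (m : Int), Dom_circular_array_path n m → Pre_circular_array_path n m → Spec_circular_array_path n m (circular_array_path n m)

-- ===== LEMMAS AND PROOFS =====

theorem pvGcdLoop_eq_gcd (b a : Nat) : pvGcdLoop a b = Nat.gcd a b := by
  induction b using Nat.strong_induction_on generalizing a with
  | _ b ih =>
    cases b with
    | zero => simp [pvGcdLoop]
    | succ c =>
      rw [pvGcdLoop, ih (a % (c + 1)) (Nat.mod_lt _ (Nat.succ_pos c)),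
        Nat.gcd_comm (c + 1), ← Nat.gcd_rec, Nat.gcd_comm]

-- the divisibility characterization: n ∣ k*m ↔ (|n|/gcd) ∣ k
theorem pv_dvd_iff (n m : Int) (hn : n ≠ 0) (k : Nat) :
    n ∣ (k : Int) * m ↔ (n.natAbs / Nat.gcd n.natAbs m.natAbs) ∣ k := by
  set N := n.natAbs with hN
  set M := m.natAbs with hM
  have hNpos : 0 < N := Int.natAbs_pos.mpr hn
  set g := Nat.gcd N M with hg
  have hgpos : 0 < g := Nat.gcd_pos_of_pos_left M hNpos
  have hgN : g ∣ N := Nat.gcd_dvd_left N M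
  have hgM : g ∣ M := Nat.gcd_dvd_right N M
  have h1 : n ∣ (k : Int) * m ↔ N ∣ k * M := by
    rw [← Int.natAbs_dvd_natAbs, Int.natAbs_mul, Int.natAbs_natCast]
  rw [h1]
  constructor
  · intro h
    have hco : (N / g).Coprime (M / g) := Nat.coprime_div_gcd_div_gcd hgpos
    have hMeq : g * (M / g) = M := Nat.mul_div_cancel' hgM
    have h2 : g * (N / g) ∣ g * (k * (M / g)) := by
      rw [Nat.mul_div_cancel' hgN]
      calc N ∣ k * M := h
        _ = g * (k * (M / g)) := by
            conv_lhs => rw [← hMeq]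
            ring
    have h3 : (N / g) ∣ k * (M / g) :=
      (Nat.mul_dvd_mul_iff_left hgpos).mp h2
    exact hco.dvd_of_dvd_mul_right h3
  · rintro ⟨t, rfl⟩
    refine ⟨t * (M / g), ?_⟩
    calc N / g * t * M = N / g * t * (g * (M / g)) := by rw [Nat.mul_div_cancel' hgM]
      _ = (N / g * g) * (t * (M / g)) := by ring
      _ = N * (t * (M / g)) := by rw [Nat.div_mul_cancel hgN]


-- Python's `%` step composes: ((a % n) + m) % n = (a + m) % n
theorem pv_mod_step (n a m : Int) :
    PySem.Int.mod (PySem.Int.mod a n + m) n = PySem.Int.mod (a + m) n := by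
  simp only [PySem.Int.mod]
  rw [Int.fmod_def a n]
  have : a - n * a.fdiv n + m = a + m + n * (-a.fdiv n) := by ring
  rw [this, Int.add_mul_fmod_self_left]

-- loop characterization: from position (k*m) % n with enough fuel, the loop
-- emits exactly the positions for indices k+1 .. L
theorem pvALoop_char (n m : Int) (L : Nat)
    (hL : ∀ k : Nat, n ∣ (k : Int) * m ↔ L ∣ k) :
    ∀ (fuel k : Nat), k < L → L - k ≤ fuel →
      pvALoop n m fuel (PySem.Int.mod ((k : Int) * m) n) =
        (List.range' (k + 1) (L - k)).map (fun (i : Nat) => PySem.Int.mod ((i : Int) * m) n + 1) := by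
  intro fuel
  induction fuel with
  | zero => intro k hk hf; omega
  | succ fuel ih =>
    intro k hk hf
    have hstep : PySem.Int.mod (PySem.Int.mod ((k : Int) * m) n + m) n
        = PySem.Int.mod (((k + 1 : Nat) : Int) * m) n := by
      rw [pv_mod_step]; push_cast; ring_nf
    rw [pvALoop]
    simp only [hstep]
    by_cases hz : PySem.Int.mod (((k + 1 : Nat) : Int) * m) n = 0
    · -- back at zero: k+1 = L
      have hdvd : L ∣ (k + 1) := (hL (k + 1)).mp ((PySem.Int.mod_eq_zero_iff_dvd _ _).mp hz)
      have hkL : k + 1 = L := by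
        have := Nat.le_of_dvd (Nat.succ_pos k) hdvd
        omega
      have hLk : L - k = 1 := by omega
      rw [if_pos hz, hLk, List.range'_one]
      simp
    · -- not yet at zero: k+1 < L
      have hnd : ¬ L ∣ (k + 1) := fun h =>
        hz ((PySem.Int.mod_eq_zero_iff_dvd _ _).mpr ((hL (k + 1)).mpr h))
      have hk1 : k + 1 < L := by
        rcases Nat.lt_or_ge (k + 1) L with h | h
        · exact h
        · exact absurd ((by omega : k + 1 = L) ▸ dvd_refl L) hnd
      rw [if_neg hz, ih (k + 1) hk1 (by omega)]
      have hLk : L - k = (L - (k + 1)) + 1 := by omega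
      rw [hLk, List.range'_succ, List.map_cons]

theorem pv_L_pos (n m : Int) (hn : n ≠ 0) :
    0 < n.natAbs / Nat.gcd n.natAbs m.natAbs := by
  have hNpos : 0 < n.natAbs := Int.natAbs_pos.mpr hn
  exact Nat.div_pos (Nat.le_of_dvd hNpos (Nat.gcd_dvd_left _ _))
    (Nat.gcd_pos_of_pos_left _ hNpos)

-- ===== VERDICT =====
theorem circular_array_path_spec : Claim_equal_circular_array_path := by
  intro n m _ hn
  unfold Spec_circular_array_path
  simp only [circular_array_path, circular_array_path_alt, pvGcdLoop_eq_gcd]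
  set L := n.natAbs / Nat.gcd n.natAbs m.natAbs with hLdef
  have hLpos : 0 < L := pv_L_pos n m hn
  have hLle : L ≤ n.natAbs := Nat.div_le_self _ _
  have h0 : (0 : Int) = PySem.Int.mod (((0 : Nat) : Int) * m) n := by
    simp [PySem.Int.mod, Int.zero_fmod]
  conv_lhs => rw [h0]
  rw [pvALoop_char n m L (pv_dvd_iff n m hn) n.natAbs 0 hLpos (by omega),
    PySem.List.pyRange_one]
  have htn : ((L : Int) + 1 - 1).toNat = L := by omega
  rw [htn, Nat.sub_zero, List.range'_eq_map_range, List.map_map, List.map_map]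
  apply List.map_congr_left
  intro k _
  simp only [Function.comp]
  push_cast
  ring_nf
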